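-- pv_equiv track=rewrite | github.com/slyboots/fakeredis-py | scripts/supported.py | commands_groups
-- ===== SOURCE A (Python) =====
-- def commands_groups(
--         all_commands: dict, implemented_set: set
-- ) -> tuple[dict[str, list[str]], dict[str, list[str]]]:
--     implemented, unimplemented = dict(), dict()
--     for cmd in all_commands:
--         group = all_commands[cmd]['group']
--         if cmd in implemented_set:
--             implemented.setdefault(group, []).append(cmd)
--         else:
--             unimplemented.setdefault(group, []).append(cmd)
--     return implemented, unimplemented
-- ===== SOURCE B (Python) =====
-- def _group_by(all_commands, cmds):
--     gs = [all_commands[c]['group'] for c in cmds]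
--     order = list(dict.fromkeys(gs))
--     return {g: [c for c, h in zip(cmds, gs) if h == g] for g in order}
--
--
-- def commands_groups(
--         all_commands: dict, implemented_set: set
-- ) -> tuple[dict[str, list[str]], dict[str, list[str]]]:
--     names = list(all_commands)
--     return (_group_by(all_commands, [c for c in names if c in implemented_set]),
--             _group_by(all_commands, [c for c in names if c not in implemented_set]))
-- ===== Notes on version B (the rewrite author's own statement) =====
-- stated objective: alternative
-- what changed: Replaces the single branching loop that grows two dicts via setdefault/append with two visibly separate stages: first partition the command names into two ordered lists by membership, then group each list by building the ordered list of distinct groups (dict.fromkeys) and collecting each group's commands with a per-group filter.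
import Mathlib
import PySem

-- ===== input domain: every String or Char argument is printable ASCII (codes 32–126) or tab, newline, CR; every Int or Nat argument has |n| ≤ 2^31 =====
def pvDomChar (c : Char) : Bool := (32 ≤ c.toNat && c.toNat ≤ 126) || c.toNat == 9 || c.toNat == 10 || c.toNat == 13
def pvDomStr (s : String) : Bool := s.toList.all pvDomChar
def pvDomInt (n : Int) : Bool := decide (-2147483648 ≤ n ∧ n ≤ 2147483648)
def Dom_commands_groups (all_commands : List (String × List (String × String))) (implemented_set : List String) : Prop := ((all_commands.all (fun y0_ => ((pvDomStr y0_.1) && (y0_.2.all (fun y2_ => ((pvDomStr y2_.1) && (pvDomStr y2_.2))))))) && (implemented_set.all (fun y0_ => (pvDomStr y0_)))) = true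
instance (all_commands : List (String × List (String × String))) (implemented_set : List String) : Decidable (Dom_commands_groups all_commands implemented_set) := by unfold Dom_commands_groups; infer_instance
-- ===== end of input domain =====

-- B restates A as two visibly separate stages: partition the names into two ordered lists,
-- then group each list via the ordered list of distinct groups plus a per-group filter (alternative decomposition, no speed claim).

-- ===== PORT A =====
-- all_commands[cmd]['group'];  the "" default is unreachable under Pre_ (keys nodup, 'group' present)
def cgGroupOfA (all_commands : List (String × List (String × String))) (cmd : String) : String :=
  PySem.Dict.getD (PySem.Dict.mk (PySem.Dict.getD (PySem.Dict.mk all_commands) cmd [])) "group" ""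

def commands_groups (all_commands : List (String × List (String × String))) (implemented_set : List String) : (List (String × List String)) × (List (String × List String)) :=
  let st := all_commands.foldl
    (fun (st : PySem.Dict String (List String) × PySem.Dict String (List String)) p =>
      let cmd := p.1
      let group := cgGroupOfA all_commands cmd
      if implemented_set.contains cmd then
        (PySem.Dict.modify st.1 group [] (· ++ [cmd]), st.2)
      else
        (st.1, PySem.Dict.modify st.2 group [] (· ++ [cmd])))
    (PySem.Dict.empty, PySem.Dict.empty)
  (st.1.items, st.2.items)

-- ===== PORT B =====
def cgAltGroupOf (all_commands : List (String × List (String × String))) (cmd : String) : String :=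
  PySem.Dict.getD (PySem.Dict.mk (PySem.Dict.getD (PySem.Dict.mk all_commands) cmd [])) "group" ""

def cgAltGroupBy (all_commands : List (String × List (String × String))) (cmds : List String) : List (String × List String) :=
  let gs := cmds.map (cgAltGroupOf all_commands)
  (PySem.List.dedup gs).map (fun g => (g, ((cmds.zip gs).filter (fun p => p.2 == g)).map (·.1)))

def commands_groups_alt (all_commands : List (String × List (String × String))) (implemented_set : List String) : (List (String × List String)) × (List (String × List String)) :=
  let names := all_commands.map (·.1)
  (cgAltGroupBy all_commands (names.filter (fun c => implemented_set.contains c)),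
   cgAltGroupBy all_commands (names.filter (fun c => !implemented_set.contains c)))

-- ===== PRECONDITION & SPEC =====
-- Pre_ excludes assoc lists that do not represent a Python dict (duplicate outer or inner keys —
-- unrepresentable as the Python input) and inner dicts without a 'group' key (Python A raises KeyError there).
def Pre_commands_groups (all_commands : List (String × List (String × String))) (implemented_set : List String) : Prop :=
  (all_commands.map (·.1)).Nodup ∧
  ∀ p ∈ all_commands, (p.2.map (·.1)).Nodup ∧ "group" ∈ p.2.map (·.1)
instance (all_commands : List (String × List (String × String))) (implemented_set : List String) : Decidable (Pre_commands_groups all_commands implemented_set) := by unfold Pre_commands_groups; infer_instance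

def pvWitness_commands_groups : (List (String × List (String × String))) × List String :=
  ([("get", [("group", "string")]), ("lpush", [("group", "list")])], ["get"])

def Spec_commands_groups (all_commands : List (String × List (String × String))) (implemented_set : List String) (out : (List (String × List String)) × (List (String × List String))) : Prop := out = commands_groups_alt all_commands implemented_set
instance (all_commands : List (String × List (String × String))) (implemented_set : List String) (out : (List (String × List String)) × (List (String × List String))) : Decidable (Spec_commands_groups all_commands implemented_set out) := by unfold Spec_commands_groups; infer_instance

-- ===== CLAIM (what is proved, stated in full; the proofs are below) =====
def Claim_equal_commands_groups : Prop := ∀ (all_commands : List (String × List (String × String))) (implemented_set : List String), Dom_commands_groups all_commands implemented_set → Pre_commands_groups all_commands implemented_set → Spec_commands_groups all_commands implemented_set (commands_groups all_commands implemented_set)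

-- ===== LEMMAS AND PROOFS =====

theorem cg_zip_self_map {α β : Type} (g : α → β) (l : List α) :
    l.zip (l.map g) = l.map (fun c => (c, g c)) := by
  induction l with
  | nil => rfl
  | cons x t ih => simp [ih]

-- the grouping fold (setdefault/append over a keyed list), characterised as B's table
theorem cg_grouped_items (grp : String → String) (l : List String) :
    (l.foldl (fun d c => PySem.Dict.modify d (grp c) [] (· ++ [c])) PySem.Dict.empty).items
      = (PySem.List.dedup (l.map grp)).map
          (fun g => (g, ((l.zip (l.map grp)).filter (fun p => p.2 == g)).map (·.1))) := by
  have hmap : l.foldl (fun d c => PySem.Dict.modify d (grp c) [] (· ++ [c])) PySem.Dict.empty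
      = (l.map (fun c => (grp c, c))).foldl
          (fun d p => PySem.Dict.modify d p.1 [] (· ++ [p.2])) PySem.Dict.empty := by
    rw [List.foldl_map]
  have hnd : (l.foldl (fun d c => PySem.Dict.modify d (grp c) [] (· ++ [c]))
      PySem.Dict.empty).keys.Nodup := by
    exact PySem.Dict.nodup_keys_foldl_modify_key l grp [] (fun _ c => (· ++ [c]))
      PySem.Dict.empty (by simp)
  rw [PySem.Dict.items_eq_map_keys _ hnd []]
  have hkeys : (l.foldl (fun d c => PySem.Dict.modify d (grp c) [] (· ++ [c]))
      PySem.Dict.empty).keys = PySem.List.dedup (l.map grp) := by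
    rw [PySem.Dict.keys_foldl_modify_key]
    simp [PySem.Set.update, PySem.Set.ofList_eq_foldl, PySem.List.dedup_eq_ofList]
  rw [hkeys]
  apply List.map_congr_left
  intro g _
  refine Prod.ext rfl ?_
  rw [hmap, PySem.Dict.getD_foldl_modify_append, cg_zip_self_map]
  simp [List.filter_map, Function.comp_def]

-- one side of A's loop, split out and rewritten to B's two-stage form
theorem cg_component (all_commands : List (String × List (String × String))) (pred : String → Bool) :
    (all_commands.foldl
        (fun d p => if pred p.1 then
            PySem.Dict.modify d (cgGroupOfA all_commands p.1) [] (· ++ [p.1]) else d)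
        PySem.Dict.empty).items
      = cgAltGroupBy all_commands ((all_commands.map (·.1)).filter pred) := by
  rw [PySem.List.foldl_if_eq_foldl_filter]
  have h1 : (all_commands.filter (fun p => pred p.1)).foldl
        (fun d p => PySem.Dict.modify d (cgGroupOfA all_commands p.1) [] (· ++ [p.1]))
        PySem.Dict.empty
      = ((all_commands.filter (fun p => pred p.1)).map (·.1)).foldl
        (fun d c => PySem.Dict.modify d (cgGroupOfA all_commands c) [] (· ++ [c]))
        PySem.Dict.empty := by
    rw [List.foldl_map]
  have h2 : (all_commands.map (·.1)).filter pred
      = (all_commands.filter (fun p => pred p.1)).map (·.1) := by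
    simp [List.filter_map, Function.comp_def]
  rw [h1, h2, cg_grouped_items]
  rfl

-- ===== VERDICT (by name: the statement is the Claim_ definition above) =====
theorem commands_groups_spec : Claim_equal_commands_groups := by
  intro a i _hdom _hpre
  show commands_groups a i = commands_groups_alt a i
  unfold commands_groups commands_groups_alt
  have hsplit : a.foldl
      (fun (st : PySem.Dict String (List String) × PySem.Dict String (List String)) p =>
        let cmd := p.1
        let group := cgGroupOfA a cmd
        if i.contains cmd then (PySem.Dict.modify st.1 group [] (· ++ [cmd]), st.2)
        else (st.1, PySem.Dict.modify st.2 group [] (· ++ [cmd])))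
      (PySem.Dict.empty, PySem.Dict.empty)
    = (a.foldl (fun d p => if i.contains p.1 then
          PySem.Dict.modify d (cgGroupOfA a p.1) [] (· ++ [p.1]) else d) PySem.Dict.empty,
       a.foldl (fun d p => if !i.contains p.1 then
          PySem.Dict.modify d (cgGroupOfA a p.1) [] (· ++ [p.1]) else d) PySem.Dict.empty) := by
    have h1 := PySem.List.foldl_congr_mem (l := a)
      (init := ((PySem.Dict.empty : PySem.Dict String (List String)),
                (PySem.Dict.empty : PySem.Dict String (List String))))
      (f := fun st p =>
        let cmd := p.1
        let group := cgGroupOfA a cmd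
        if i.contains cmd then (PySem.Dict.modify st.1 group [] (· ++ [cmd]), st.2)
        else (st.1, PySem.Dict.modify st.2 group [] (· ++ [cmd])))
      (g := fun st p =>
        ((fun d (q : String × List (String × String)) => if i.contains q.1 then
            PySem.Dict.modify d (cgGroupOfA a q.1) [] (· ++ [q.1]) else d) st.1 p,
         (fun d (q : String × List (String × String)) => if !i.contains q.1 then
            PySem.Dict.modify d (cgGroupOfA a q.1) [] (· ++ [q.1]) else d) st.2 p))
      (by intro acc x _; by_cases h : x.1 ∈ i <;> simp [h])
    rw [h1]
    exact PySem.List.foldl_prod_mk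
      (f := fun d (q : String × List (String × String)) => if i.contains q.1 then
          PySem.Dict.modify d (cgGroupOfA a q.1) [] (· ++ [q.1]) else d)
      (g := fun d (q : String × List (String × String)) => if !i.contains q.1 then
          PySem.Dict.modify d (cgGroupOfA a q.1) [] (· ++ [q.1]) else d)
      (l := a) (a := PySem.Dict.empty) (b := PySem.Dict.empty)
  rw [hsplit]
  simp only
  rw [cg_component a (fun c => i.contains c), cg_component a (fun c => !i.contains c)]
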